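-- pv_equiv track=rewrite | github.com/ksomemo/Competitive-programming | atcoder/abc/105/D.py | TLE
-- ===== SOURCE A (Python) =====
-- def TLE(N, M, A, b):
--     ans = 0
--     for l in range(N):
--         for r in range(l, N):
--             if l - 1 < 0:
--                 s = b[r]
--             else:
--                 s = b[r] - b[l-1]
--             if s % M == 0:
--                 ans += 1
--
--     return ans
-- ===== SOURCE B (Python) =====
-- def TLE(N, M, A, b):
--     # O(N) remainder-counting: b is the prefix-sum array, a subarray (l..r) sums to
--     # b[r] - b[l-1] (with b[-1] taken as 0); it is divisible by M iff the two prefix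
--     # remainders agree, so count, for each prefix, the earlier prefixes with the
--     # same remainder, seeding the counter with the virtual zero prefix.
--     cnt = {0: 1}
--     ans = 0
--     for r in range(N):
--         rem = b[r] % M
--         c = cnt.get(rem, 0)
--         ans += c
--         cnt[rem] = c + 1
--     return ans
-- ===== Notes on version B (the rewrite author's own statement) =====
-- stated objective: faster
-- what changed: Replaced the O(N^2) double loop over all (l,r) subarray pairs by a single O(N) pass that counts prefix-sum remainders mod M in a dictionary (seeded with the virtual zero prefix) and adds, for each prefix, the number of earlier prefixes with the same remainder.
import Mathlib
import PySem

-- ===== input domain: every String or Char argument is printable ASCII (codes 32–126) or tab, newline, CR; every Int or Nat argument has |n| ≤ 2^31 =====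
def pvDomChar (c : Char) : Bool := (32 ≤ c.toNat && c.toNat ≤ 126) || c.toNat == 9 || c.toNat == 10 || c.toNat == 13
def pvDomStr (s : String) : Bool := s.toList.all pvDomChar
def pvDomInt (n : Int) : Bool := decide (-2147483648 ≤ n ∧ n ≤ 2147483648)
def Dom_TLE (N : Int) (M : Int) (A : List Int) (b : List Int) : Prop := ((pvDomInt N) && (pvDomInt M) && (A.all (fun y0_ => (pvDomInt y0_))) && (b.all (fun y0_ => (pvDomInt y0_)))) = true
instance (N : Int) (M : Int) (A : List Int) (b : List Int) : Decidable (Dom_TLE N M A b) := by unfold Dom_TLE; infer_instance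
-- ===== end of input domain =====

-- B replaces A's O(N^2) double loop over subarray endpoints by one O(N) pass that
-- counts prefix-sum remainders mod M in a dictionary (seeded with the virtual zero prefix).


-- ===== PORT A =====
def TLE (N : Int) (M : Int) (A : List Int) (b : List Int) : Int :=
  -- ans = 0; for l in range(N): for r in range(l, N): …
  (PySem.List.pyRange 0 N 1).foldl (fun ans l =>
    (PySem.List.pyRange l N 1).foldl (fun ans r =>
      -- s = b[r]  (when l-1 < 0)  /  b[r] - b[l-1]; indexing is in range under Pre_TLE
      if PySem.Int.mod (if l - 1 < 0 then PySem.List.pyGetD b r 0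
                        else PySem.List.pyGetD b r 0 - PySem.List.pyGetD b (l - 1) 0) M = 0
      then ans + 1 else ans) ans) 0

-- ===== PORT B =====
def TLE_alt (N : Int) (M : Int) (A : List Int) (b : List Int) : Int :=
  -- cnt = {0: 1}; ans = 0; for r in range(N): rem = b[r] % M; c = cnt.get(rem, 0); ans += c; cnt[rem] = c + 1
  ((PySem.List.pyRange 0 N 1).foldl (fun st r =>
      (st.1.insert (PySem.Int.mod (PySem.List.pyGetD b r 0) M)
        (st.1.getD (PySem.Int.mod (PySem.List.pyGetD b r 0) M) 0 + 1),
       st.2 + st.1.getD (PySem.Int.mod (PySem.List.pyGetD b r 0) M) 0))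
    ((PySem.Dict.empty.insert (0 : Int) (1 : Int)), (0 : Int))).2

-- ===== PRECONDITION & SPEC =====
-- Pre_ excludes exactly the inputs where A raises: N > len(b) (IndexError on b[r]) and
-- 0 < N with M = 0 (ZeroDivisionError on s % M); B raises on the same inputs.
def Pre_TLE (N : Int) (M : Int) (A : List Int) (b : List Int) : Prop :=
  N ≤ (b.length : Int) ∧ (0 < N → M ≠ 0)
instance (N : Int) (M : Int) (A : List Int) (b : List Int) : Decidable (Pre_TLE N M A b) := by unfold Pre_TLE; infer_instance

def pvWitness_TLE : Int × Int × List Int × List Int := (3, 2, [], [1, 3, 4])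

def Spec_TLE (N : Int) (M : Int) (A : List Int) (b : List Int) (out : Int) : Prop := out = TLE_alt N M A b
instance (N : Int) (M : Int) (A : List Int) (b : List Int) (out : Int) : Decidable (Spec_TLE N M A b out) := by unfold Spec_TLE; infer_instance

-- ===== CLAIM (what is proved, stated in full; the proofs are below) =====
def Claim_equal_TLE : Prop := ∀ (N : Int) (M : Int) (A : List Int) (b : List Int), Dom_TLE N M A b → Pre_TLE N M A b → Spec_TLE N M A b (TLE N M A b)

-- ===== LEMMAS AND PROOFS =====

-- Python % agrees between x and y exactly when M divides x - y (floor mod, any M ≠ 0).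

theorem pv_mod_eq_mod_iff_dvd (x y M : Int) (hM : M ≠ 0) :
    PySem.Int.mod x M = PySem.Int.mod y M ↔ M ∣ (x - y) := by
  have hx := PySem.Int.floordiv_mul_add_mod x M
  have hy := PySem.Int.floordiv_mul_add_mod y M
  constructor
  · intro h
    exact ⟨PySem.Int.floordiv x M - PySem.Int.floordiv y M, by linarith [hx, hy]⟩
  · intro ⟨c, hc⟩
    have hdvd : M ∣ (PySem.Int.mod x M - PySem.Int.mod y M) := by
      exact ⟨c - (PySem.Int.floordiv x M - PySem.Int.floordiv y M), by linarith [hx, hy]⟩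
    rcases lt_or_gt_of_ne hM with hneg | hpos
    · have h1 := PySem.Int.mod_neg_bounds x hneg
      have h2 := PySem.Int.mod_neg_bounds y hneg
      have := Int.eq_zero_of_abs_lt_dvd (Int.neg_dvd.mpr hdvd) (by rw [abs_lt]; omega)
      omega
    · have h1 := PySem.Int.mod_nonneg x hpos
      have h2 := PySem.Int.mod_lt x hpos
      have h3 := PySem.Int.mod_nonneg y hpos
      have h4 := PySem.Int.mod_lt y hpos
      have := Int.eq_zero_of_abs_lt_dvd hdvd (by rw [abs_lt]; omega)
      omega

theorem pv_map_getD_range (b : List Int) (n : Nat) (h : n ≤ b.length) :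
    (List.range n).map (fun k => b.getD k 0) = b.take n := by
  apply List.ext_getElem
  · simp [h]
  · intro i h1 h2
    simp at h1 ⊢
    rw [List.getElem?_eq_getElem (by omega)]
    rfl

-- the prefix value that A compares b[r] against: q(0) = 0 (virtual zero prefix), q(l) = b[l-1]
def pvQ (b : List Int) (l : Int) : Int :=
  if l - 1 < 0 then 0 else PySem.List.pyGetD b (l - 1) 0

-- A's inner loop as a count
def pvCntA (N M : Int) (b : List Int) (l : Int) : Int :=
  ((PySem.List.pyRange l N 1).countP (fun r =>
    decide (PySem.Int.mod (if l - 1 < 0 then PySem.List.pyGetD b r 0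
                           else PySem.List.pyGetD b r 0 - PySem.List.pyGetD b (l - 1) 0) M = 0)) : Int)

-- [q(l) for l in range(n+1)] = 0 :: b.take n
theorem pv_map_q (b : List Int) (n : Nat) (h : n ≤ b.length) :
    (PySem.List.pyRange 0 ((n : Int) + 1) 1).map (pvQ b) = 0 :: b.take n := by
  rw [PySem.List.pyRange_one]
  have h1 : (((n : Int) + 1) - 0).toNat = n + 1 := by omega
  rw [h1, List.range_succ_eq_map]
  simp only [List.map_cons, List.map_map]
  congr 1
  rw [← pv_map_getD_range b n h]
  apply List.map_congr_left
  intro k hk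
  simp only [List.mem_range] at hk
  simp only [Function.comp, pvQ]
  have h2 : (0 : Int) + (↑(Nat.succ k)) - 1 = (k : Int) := by push_cast; ring
  rw [h2]
  have h3 : ¬ ((k : Int) < 0) := by omega
  simp [h3]

-- [b[r] for r in range(n)] = b.take n
theorem pv_map_b (b : List Int) (n : Nat) (h : n ≤ b.length) :
    (PySem.List.pyRange 0 (n : Int) 1).map (fun r => PySem.List.pyGetD b r 0) = b.take n := by
  rw [PySem.List.pyRange_one, List.map_map]
  rw [← pv_map_getD_range b n h]
  apply List.map_congr_left
  intro k hk
  simp at hk ⊢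


theorem pv_A_sum (N M : Int) (A b : List Int) :
    TLE N M A b = ((PySem.List.pyRange 0 N 1).map (pvCntA N M b)).sum := by
  unfold TLE
  rw [PySem.List.foldl_congr_mem _ _ (fun ans l => ans + pvCntA N M b l) 0
    (by intro acc l _; rw [PySem.List.foldl_ite_add_one]; rfl)]
  rw [PySem.List.foldl_add]
  simp

theorem pv_A_rec (M : Int) (A b : List Int) (n : Nat) (hn : n < b.length) (hM : M ≠ 0) :
    TLE ((n : Int) + 1) M A b
      = TLE (n : Int) M A b
        + (((0 :: b.take n).map (fun x => PySem.Int.mod x M)).count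
            (PySem.Int.mod (b.getD n 0) M) : Int) := by
  have h0n : (0 : Int) ≤ (n : Int) := by omega
  have hsplit : PySem.List.pyRange 0 ((n : Int) + 1) 1
      = PySem.List.pyRange 0 (n : Int) 1 ++ [(n : Int)] :=
    PySem.List.pyRange_one_succ_right h0n
  -- the 0/1 indicator of "subarray (l..n) sums to 0 mod M"
  set pred : Int → Bool := fun l =>
    decide (PySem.Int.mod (if l - 1 < 0 then PySem.List.pyGetD b ((n : Nat) : Int) 0
            else PySem.List.pyGetD b ((n : Nat) : Int) 0 - PySem.List.pyGetD b (l - 1) 0) M = 0)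
    with hpred
  rw [pv_A_sum, pv_A_sum, hsplit, List.map_append, List.sum_append]
  -- the inner count for each old l gains exactly the indicator at r = n
  have hstep : ∀ l ∈ PySem.List.pyRange 0 (n : Int) 1,
      pvCntA ((n : Int) + 1) M b l
        = pvCntA (n : Int) M b l + (if pred l = true then (1 : Int) else 0) := by
    intro l hl
    rw [PySem.List.mem_pyRange_one] at hl
    unfold pvCntA
    rw [PySem.List.pyRange_one_succ_right (by omega), List.countP_append]
    push_cast
    congr 1
    simp [hpred, List.countP_cons]
  -- the new outer term l = n contributes the indicator at (n, n)
  have hlast : pvCntA ((n : Int) + 1) M b (n : Int)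
      = if pred (n : Int) = true then (1 : Int) else 0 := by
    unfold pvCntA
    rw [PySem.List.pyRange_one_cons (by omega)]
    have he : PySem.List.pyRange ((n : Int) + 1) ((n : Int) + 1) 1 = [] := by
      simp
    rw [he]
    simp [hpred, List.countP_cons]
  rw [List.map_congr_left hstep, PySem.List.sum_map_add_int]
  -- collect the indicators over l = 0..n into one count on the prefix-remainder list
  have hcollect :
      ((PySem.List.pyRange 0 (n : Int) 1).map (fun l => if pred l = true then (1:Int) else 0)).sum
        + (if pred (n : Int) = true then (1 : Int) else 0)
      = (((0 :: b.take n).map (fun x => PySem.Int.mod x M)).count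
          (PySem.Int.mod (b.getD n 0) M) : Int) := by
    have hre : ((PySem.List.pyRange 0 ((n : Int) + 1) 1).map
        (fun l => if pred l = true then (1:Int) else 0)).sum
        = ((PySem.List.pyRange 0 (n : Int) 1).map (fun l => if pred l = true then (1:Int) else 0)).sum
          + (if pred (n : Int) = true then (1 : Int) else 0) := by
      rw [hsplit, List.map_append, List.sum_append]; simp
    rw [← hre, PySem.List.sum_map_ite_one_zero]
    -- countP pred (range) = count v (remainder list)
    have hmapq : (PySem.List.pyRange 0 ((n : Int) + 1) 1).map
        (fun l => PySem.Int.mod (pvQ b l) M)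
        = (0 :: b.take n).map (fun x => PySem.Int.mod x M) := by
      rw [← pv_map_q b n (by omega), List.map_map]
      rfl
    rw [← hmapq, List.count_eq_countP, List.countP_map]
    congr 1
    apply List.countP_congr
    intro l hl
    rw [PySem.List.mem_pyRange_one] at hl
    simp only [hpred, Function.comp, pvQ]
    by_cases hc : l - 1 < 0
    · simp only [if_pos hc, decide_eq_true_iff, beq_iff_eq,
        pv_mod_eq_mod_iff_dvd _ _ _ hM, PySem.Int.mod_eq_zero_iff_dvd, zero_sub, Int.dvd_neg]
      simp
    · simp only [if_neg hc, decide_eq_true_iff, beq_iff_eq,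
        pv_mod_eq_mod_iff_dvd _ _ _ hM, PySem.Int.mod_eq_zero_iff_dvd]
      have hbn : PySem.List.pyGetD b ((n : Nat) : Int) 0 = b.getD n 0 := by simp
      rw [hbn]
      exact dvd_sub_comm
  simp only [List.map_cons, List.map_nil, List.sum_cons, List.sum_nil, add_zero, hlast]
  rw [add_assoc, hcollect]
  simp

theorem pv_fold_fst (xs : List Int) (d : PySem.Dict Int Int) (a : Int) :
    (xs.foldl (fun st x => (st.1.insert x (st.1.getD x 0 + 1), st.2 + st.1.getD x 0)) (d, a)).1
      = xs.foldl (fun d x => d.insert x (d.getD x 0 + 1)) d := by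
  induction xs generalizing d a with
  | nil => rfl
  | cons x xs ih => simp only [List.foldl_cons]; exact ih _ _

theorem pv_B_rec (M : Int) (A b : List Int) (n : Nat) (hn : n < b.length) (hM : M ≠ 0) :
    TLE_alt ((n : Int) + 1) M A b
      = TLE_alt (n : Int) M A b
        + (((0 :: b.take n).map (fun x => PySem.Int.mod x M)).count
            (PySem.Int.mod (b.getD n 0) M) : Int) := by
  have h0n : (0 : Int) ≤ (n : Int) := by omega
  unfold TLE_alt
  rw [PySem.List.pyRange_one_succ_right h0n, List.foldl_append]
  rw [← List.foldl_map (f := fun r => PySem.Int.mod (PySem.List.pyGetD b r 0) M)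
        (g := fun (st : PySem.Dict Int Int × Int) x =>
          (st.1.insert x (st.1.getD x 0 + 1), st.2 + st.1.getD x 0))]
  rw [← List.foldl_map (f := fun r => PySem.Int.mod (PySem.List.pyGetD b r 0) M)
        (g := fun (st : PySem.Dict Int Int × Int) x =>
          (st.1.insert x (st.1.getD x 0 + 1), st.2 + st.1.getD x 0))]
  have hmap : (PySem.List.pyRange 0 (n : Int) 1).map
      (fun r => PySem.Int.mod (PySem.List.pyGetD b r 0) M)
      = (b.take n).map (fun x => PySem.Int.mod x M) := by
    rw [← pv_map_b b n (by omega), List.map_map]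
    rfl
  rw [hmap]
  simp only [List.map_cons, List.map_nil, List.foldl_cons, List.foldl_nil]
  set st := ((b.take n).map (fun x => PySem.Int.mod x M)).foldl
      (fun (st : PySem.Dict Int Int × Int) x =>
        (st.1.insert x (st.1.getD x 0 + 1), st.2 + st.1.getD x 0))
      ((PySem.Dict.empty.insert (0 : Int) (1 : Int)), (0 : Int)) with hst
  have hbn : PySem.List.pyGetD b ((n : Nat) : Int) 0 = b.getD n 0 := by simp
  have hfst : st.1.getD (PySem.Int.mod (b.getD n 0) M) 0
      = (((0 :: b.take n).map (fun x => PySem.Int.mod x M)).count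
          (PySem.Int.mod (b.getD n 0) M) : Int) := by
    rw [hst, pv_fold_fst, PySem.Dict.getD_foldl_insert_add_one]
    rw [PySem.Dict.getD_insert, PySem.Dict.getD_empty]
    rw [List.map_cons, List.count_cons]
    have hz : PySem.Int.mod 0 M = 0 := (PySem.Int.mod_eq_zero_iff_dvd 0 M).mpr (dvd_zero M)
    rw [hz]
    push_cast
    by_cases he : PySem.Int.mod (b.getD n 0) M = 0
    · rw [if_pos he, if_pos (by show (0 == PySem.Int.mod (b.getD n 0) M) = true; simp only [beq_iff_eq]; exact he.symm)]; ring
    · rw [if_neg he, if_neg (by show ¬ (0 == PySem.Int.mod (b.getD n 0) M) = true; simp only [beq_iff_eq]; exact fun h => he h.symm)]; ring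
  simp only [hbn]
  rw [hfst]
  simp [List.map_cons]


theorem pv_main_aux (M : Int) (A b : List Int) (hM : M ≠ 0) :
    ∀ n : Nat, n ≤ b.length → TLE (n : Int) M A b = TLE_alt (n : Int) M A b := by
  intro n
  induction n with
  | zero => intro _; simp [TLE, TLE_alt, PySem.List.pyRange_one]
  | succ n ih =>
    intro h
    have h' : n < b.length := h
    push_cast
    rw [pv_A_rec M A b n h' hM, pv_B_rec M A b n h' hM, ih (le_of_lt h')]

-- ===== VERDICT (by name: the statement is the Claim_ definition above) =====
theorem TLE_spec : Claim_equal_TLE := by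
  intro N M A b _ hpre
  unfold Spec_TLE
  obtain ⟨h1, h2⟩ := hpre
  by_cases hpos : 0 < N
  case neg =>
    have hz : N.toNat = 0 := by omega
    simp [TLE, TLE_alt, PySem.List.pyRange_one, hz]
  case pos =>
    have hN : N = ((N.toNat : Nat) : Int) := by omega
    rw [hN]
    exact pv_main_aux M A b (h2 hpos) N.toNat (by omega)
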